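-- pv_equiv track=rewrite | github.com/bob686868/Leetcode-100-day-challenge- | day62.py | lc3606
-- ===== SOURCE A (Python) =====
-- def lc3606(code,businessLine,isActive):
--         validB=["electronics","grocery","pharmacy","restaurant"]
--         res=[]
--         character_list = ['a', 'b', 'c', 'd', 'e', 'f', 'g', 'h', 'i', 'j', 'k', 'l', 'm', 'n', 'o', 'p', 'q', 'r', 's', 't', 'u', 'v', 'w', 'x', 'y', 'z', 'A', 'B', 'C', 'D', 'E', 'F', 'G', 'H', 'I', 'J', 'K', 'L', 'M', 'N', 'O', 'P', 'Q', 'R', 'S', 'T', 'U', 'V', 'W', 'X', 'Y', 'Z', '0', '1', '2', '3', '4', '5', '6', '7', '8', '9', '_' ]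
--         def isAlphaNum(c):
--             return c != "" and all(char in character_list for char in c )
--
--         for i in range(len(code)):
--             c,b,a=code[i],businessLine[i],isActive[i]
--             if not a or not isAlphaNum(c) or not b in validB:continue
--             res.append((validB.index(b),c))
--         res.sort()
--         newRes=[]
--         for _,code in res:
--              newRes.append(code)
--         return newRes
-- ===== SOURCE B (Python) =====
-- def lc3606(code, businessLine, isActive):
--     validB = ["electronics", "grocery", "pharmacy", "restaurant"]
--     allowed = set("abcdefghijklmnopqrstuvwxyzABCDEFGHIJKLMNOPQRSTUVWXYZ0123456789_")
--     buckets = {}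
--     for c, b, a in zip(code, businessLine, isActive):
--         if a and c != "" and all(ch in allowed for ch in c) and b in validB:
--             buckets.setdefault(b, []).append(c)
--     out = []
--     for line in validB:
--         out.extend(sorted(buckets.get(line, [])))
--     return out
-- ===== Notes on version B (the rewrite author's own statement) =====
-- stated objective: faster
-- what changed: B replaces A's build-(rank,code)-tuples-then-sort pass with a single zip pass that groups passing codes into a dict of per-businessLine buckets and then emits each bucket sorted in fixed validB order, sorting plain strings per bucket instead of comparing (rank, code) tuples.
import Mathlib
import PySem

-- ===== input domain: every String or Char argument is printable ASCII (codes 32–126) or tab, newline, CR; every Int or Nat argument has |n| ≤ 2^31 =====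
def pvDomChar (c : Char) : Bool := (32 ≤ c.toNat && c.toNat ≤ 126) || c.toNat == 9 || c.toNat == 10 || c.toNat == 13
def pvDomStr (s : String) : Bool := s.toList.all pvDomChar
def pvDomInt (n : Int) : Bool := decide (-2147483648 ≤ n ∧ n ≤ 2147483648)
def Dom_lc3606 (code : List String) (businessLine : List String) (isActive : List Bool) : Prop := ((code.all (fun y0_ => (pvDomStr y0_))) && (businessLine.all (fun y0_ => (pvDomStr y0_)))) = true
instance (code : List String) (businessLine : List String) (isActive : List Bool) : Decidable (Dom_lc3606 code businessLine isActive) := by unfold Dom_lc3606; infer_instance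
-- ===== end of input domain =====

-- B groups passing codes into per-businessLine buckets in one pass and emits each bucket
-- sorted, in validB order, instead of sorting (rank, code) tuples (objective: faster, measured).

-- ===== PORT A =====
def pvCharacterList : List Char :=
  ['a','b','c','d','e','f','g','h','i','j','k','l','m','n','o','p','q','r','s','t','u','v','w','x','y','z','A','B','C','D','E','F','G','H','I','J','K','L','M','N','O','P','Q','R','S','T','U','V','W','X','Y','Z','0','1','2','3','4','5','6','7','8','9','_']

-- isAlphaNum: c != "" and all(char in character_list for char in c)
def pvIsAlphaNum (c : String) : Bool :=
  !c.toList.isEmpty && c.toList.all (fun ch => pvCharacterList.contains ch)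

def pvValidB : List String := ["electronics", "grocery", "pharmacy", "restaurant"]

-- 'validB.index(b)' is only reached when 'b in validB', so the '.getD 0' default is never used
def lc3606 (code : List String) (businessLine : List String) (isActive : List Bool) : List String :=
  let res : List (Int × String) :=
    (PySem.List.pyRange 0 code.length 1).foldl (fun res i =>
      let c := PySem.List.pyGetD code i ""
      let b := PySem.List.pyGetD businessLine i ""
      let a := PySem.List.pyGetD isActive i false
      if !a || !pvIsAlphaNum c || !pvValidB.contains b then res
      else res ++ [((((PySem.List.index? pvValidB b).getD 0 : Nat) : Int), c)]) []
  let res2 := PySem.List.sorted2 res (fun p => p.1) (fun p => p.2)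
  res2.foldl (fun newRes p => newRes ++ [p.2]) []

-- ===== PORT B =====
def pvAllowed : PySem.Set Char :=
  PySem.Set.ofList "abcdefghijklmnopqrstuvwxyzABCDEFGHIJKLMNOPQRSTUVWXYZ0123456789_".toList

def lc3606_alt (code : List String) (businessLine : List String) (isActive : List Bool) : List String :=
  let buckets : PySem.Dict String (List String) :=
    ((code.zip businessLine).zip isActive).foldl (fun d t =>
      if t.2 && (!t.1.1.toList.isEmpty && t.1.1.toList.all (fun ch => PySem.Set.contains pvAllowed ch))
          && pvValidB.contains t.1.2
      then d.modify t.1.2 [] (fun l => l ++ [t.1.1]) else d) PySem.Dict.empty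
  pvValidB.foldl (fun out line => out ++ PySem.List.sorted (buckets.getD line []) (fun x => x)) []

-- ===== PRECONDITION & SPEC =====
-- A indexes businessLine[i] and isActive[i] for every i < len(code): it raises IndexError
-- exactly when either list is shorter than code, so Pre_ excludes exactly those inputs.
def Pre_lc3606 (code : List String) (businessLine : List String) (isActive : List Bool) : Prop :=
  code.length ≤ businessLine.length ∧ code.length ≤ isActive.length
instance (code : List String) (businessLine : List String) (isActive : List Bool) : Decidable (Pre_lc3606 code businessLine isActive) := by unfold Pre_lc3606; infer_instance

def pvWitness_lc3606 : List String × List String × List Bool :=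
  (["a1", "b"], ["grocery", "electronics"], [true, true])

def Spec_lc3606 (code : List String) (businessLine : List String) (isActive : List Bool) (out : List String) : Prop := out = lc3606_alt code businessLine isActive
instance (code : List String) (businessLine : List String) (isActive : List Bool) (out : List String) : Decidable (Spec_lc3606 code businessLine isActive out) := by unfold Spec_lc3606; infer_instance

-- ===== CLAIM (what is proved, stated in full; the proofs are below) =====
def Claim_equal_lc3606 : Prop := ∀ (code : List String) (businessLine : List String) (isActive : List Bool), Dom_lc3606 code businessLine isActive → Pre_lc3606 code businessLine isActive → Spec_lc3606 code businessLine isActive (lc3606 code businessLine isActive)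


-- ===== LEMMAS AND PROOFS =====

-- insertBy walks past a prefix none of whose elements x goes before
theorem pv_insertBy_append_left {α : Type} (bf : α → α → Bool) (x : α) (as bs : List α)
    (h : ∀ y ∈ as, bf x y = false) :
    PySem.List.insertBy bf x (as ++ bs) = as ++ PySem.List.insertBy bf x bs := by
  induction as with
  | nil => rfl
  | cons a as ih =>
    have ha := h a (List.mem_cons_self ..)
    simp only [List.cons_append, PySem.List.insertBy, ha, Bool.false_eq_true, if_false]
    rw [ih (fun y hy => h y (List.mem_cons_of_mem _ hy))]

-- A-side tuple comparison used by res.sort()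
def pvBf (a b : Int × String) : Bool :=
  decide (a.1 < b.1) || (!decide (b.1 < a.1) && decide (a.2 < b.2))

theorem pv_insertBy_map_block (r : Int) (c : String) (ds : List String) (rest : List (Int × String))
    (h : ∀ y ∈ rest, pvBf (r, c) y = true) :
    PySem.List.insertBy pvBf (r, c) (ds.map (fun d => (r, d)) ++ rest)
      = (PySem.List.insertBy (fun a b => decide (a < b)) c ds).map (fun d => (r, d)) ++ rest := by
  induction ds with
  | nil =>
    cases rest with
    | nil => rfl
    | cons y ys =>
      have hy := h y (List.mem_cons_self ..)
      simp only [List.map_nil, List.nil_append, PySem.List.insertBy, hy, if_true]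
      rfl
  | cons d ds ih =>
    have hkey : pvBf (r, c) (r, d) = decide (c < d) := by
      simp [pvBf]
    by_cases hcd : c < d
    · simp only [List.map_cons, List.cons_append, PySem.List.insertBy, hkey,
        hcd, decide_true, if_true]
    · simp only [List.map_cons, List.cons_append, PySem.List.insertBy, hkey,
        hcd, decide_false, Bool.false_eq_true, if_false]
      rw [ih]

-- the block of rank r in the sorted pair list
def pvBlk (l : List (Int × String)) (r : Int) : List (Int × String) :=
  (PySem.List.sorted ((l.filter (fun p => p.1 == r)).map (fun p => p.2)) (fun x => x)).map (fun c => (r, c))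

-- the tuple sort of a list of pairs with ranks in {0,1,2,3} is the concatenation of its
-- per-rank blocks, each block the codes of that rank sorted
theorem pv_sorted_append (ds : List String) (cc : String) :
    PySem.List.sorted (ds ++ [cc]) (fun x => x)
      = PySem.List.insertBy (fun a b => decide (a < b)) cc (PySem.List.sorted ds (fun x => x)) := by
  simp only [PySem.List.sorted, List.foldl_append]
  rfl

theorem pv_sorted2_append (l : List (Int × String)) (x : Int × String) :
    PySem.List.sorted2 (l ++ [x]) (fun p => p.1) (fun p => p.2)
      = PySem.List.insertBy pvBf x (PySem.List.sorted2 l (fun p => p.1) (fun p => p.2)) := by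
  simp only [PySem.List.sorted2, List.foldl_append]
  rfl

theorem pv_bf_map_false (r i : Int) (hir : i < r) (c : String) (ds : List String) :
    ∀ y ∈ ds.map (fun d => (i, d)), pvBf (r, c) y = false := by
  intro y hy
  obtain ⟨d, _, rfl⟩ := List.mem_map.1 hy
  simp [pvBf, hir, asymm hir]

theorem pv_bf_map_true (r i : Int) (hri : r < i) (c : String) (ds : List String) :
    ∀ y ∈ ds.map (fun d => (i, d)), pvBf (r, c) y = true := by
  intro y hy
  obtain ⟨d, _, rfl⟩ := List.mem_map.1 hy
  simp [pvBf, hri]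

theorem pv_blk_append_ne (l : List (Int × String)) (r r' : Int) (c : String) (hne : r ≠ r') :
    pvBlk (l ++ [(r, c)]) r' = pvBlk l r' := by
  simp [pvBlk, List.filter_append, hne]

theorem pv_blk_append_eq (l : List (Int × String)) (r : Int) (c : String) :
    pvBlk (l ++ [(r, c)]) r
      = (PySem.List.insertBy (fun a b => decide (a < b)) c
          (PySem.List.sorted ((l.filter (fun p => p.1 == r)).map (fun p => p.2)) (fun x => x))).map
          (fun d => (r, d)) := by
  simp only [pvBlk, List.filter_append]
  have hx : List.filter (fun p => p.1 == r) [((r : Int), c)] = [(r, c)] := by simp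
  rw [hx]
  simp only [List.map_append, List.map_cons, List.map_nil]
  rw [pv_sorted_append]

theorem pv_step (l : List (Int × String)) (r : Int) (c : String)
    (hr : r = 0 ∨ r = 1 ∨ r = 2 ∨ r = 3) :
    PySem.List.insertBy pvBf (r, c) (pvBlk l 0 ++ pvBlk l 1 ++ pvBlk l 2 ++ pvBlk l 3)
      = pvBlk (l ++ [(r, c)]) 0 ++ pvBlk (l ++ [(r, c)]) 1 ++ pvBlk (l ++ [(r, c)]) 2
          ++ pvBlk (l ++ [(r, c)]) 3 := by
  rcases hr with rfl | rfl | rfl | rfl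
  · rw [pv_blk_append_eq, pv_blk_append_ne _ _ _ _ (by norm_num),
      pv_blk_append_ne _ _ _ _ (by norm_num), pv_blk_append_ne _ _ _ _ (by norm_num)]
    simp only [pvBlk, List.append_assoc]
    refine pv_insertBy_map_block 0 c _ _ ?_
    intro y hy
    rcases List.mem_append.1 hy with hy | hy
    · exact pv_bf_map_true 0 1 (by norm_num) c _ y hy
    rcases List.mem_append.1 hy with hy | hy
    · exact pv_bf_map_true 0 2 (by norm_num) c _ y hy
    · exact pv_bf_map_true 0 3 (by norm_num) c _ y hy
  · rw [pv_blk_append_eq, pv_blk_append_ne _ _ _ _ (by norm_num),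
      pv_blk_append_ne _ _ _ _ (by norm_num), pv_blk_append_ne _ _ _ _ (by norm_num)]
    simp only [pvBlk, List.append_assoc]
    rw [pv_insertBy_append_left pvBf _ _ _ (pv_bf_map_false 1 0 (by norm_num) c _)]
    refine congrArg _ ?_
    refine pv_insertBy_map_block 1 c _ _ ?_
    intro y hy
    rcases List.mem_append.1 hy with hy | hy
    · exact pv_bf_map_true 1 2 (by norm_num) c _ y hy
    · exact pv_bf_map_true 1 3 (by norm_num) c _ y hy
  · rw [pv_blk_append_eq, pv_blk_append_ne _ _ _ _ (by norm_num),
      pv_blk_append_ne _ _ _ _ (by norm_num), pv_blk_append_ne _ _ _ _ (by norm_num)]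
    simp only [pvBlk, List.append_assoc]
    rw [pv_insertBy_append_left pvBf _ _ _ (pv_bf_map_false 2 0 (by norm_num) c _)]
    refine congrArg _ ?_
    rw [pv_insertBy_append_left pvBf _ _ _ (pv_bf_map_false 2 1 (by norm_num) c _)]
    refine congrArg _ ?_
    exact pv_insertBy_map_block 2 c _ _ (pv_bf_map_true 2 3 (by norm_num) c _)
  · rw [pv_blk_append_eq, pv_blk_append_ne _ _ _ _ (by norm_num),
      pv_blk_append_ne _ _ _ _ (by norm_num), pv_blk_append_ne _ _ _ _ (by norm_num)]
    simp only [pvBlk, List.append_assoc]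
    rw [pv_insertBy_append_left pvBf _ _ _ (pv_bf_map_false 3 0 (by norm_num) c _)]
    refine congrArg _ ?_
    rw [pv_insertBy_append_left pvBf _ _ _ (pv_bf_map_false 3 1 (by norm_num) c _)]
    refine congrArg _ ?_
    rw [pv_insertBy_append_left pvBf _ _ _ (pv_bf_map_false 3 2 (by norm_num) c _)]
    refine congrArg _ ?_
    have h3 := pv_insertBy_map_block 3 c
      (PySem.List.sorted ((l.filter (fun p => p.1 == (3 : Int))).map (fun p => p.2)) (fun x => x))
      [] (by simp)
    simpa using h3

theorem pv_central (l : List (Int × String))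
    (h : ∀ p ∈ l, p.1 = 0 ∨ p.1 = 1 ∨ p.1 = 2 ∨ p.1 = 3) :
    PySem.List.sorted2 l (fun p => p.1) (fun p => p.2)
      = pvBlk l 0 ++ pvBlk l 1 ++ pvBlk l 2 ++ pvBlk l 3 := by
  induction l using List.reverseRecOn with
  | nil => rfl
  | append_singleton l x ih =>
    have hl : ∀ p ∈ l, p.1 = 0 ∨ p.1 = 1 ∨ p.1 = 2 ∨ p.1 = 3 :=
      fun p hp => h p (List.mem_append_left _ hp)
    have hx := h x (List.mem_append_right _ (List.mem_singleton_self _))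
    obtain ⟨r, c⟩ := x
    rw [pv_sorted2_append, ih hl]
    exact pv_step l r c hx

-- an index loop reading three lists is a fold over the zipped triples
theorem pv_foldl_range_zip3 {γ : Type} (code businessLine : List String) (isActive : List Bool)
    (g : γ → String → String → Bool → γ) (init : γ)
    (h1 : code.length ≤ businessLine.length) (h2 : code.length ≤ isActive.length) :
    (PySem.List.pyRange 0 code.length 1).foldl (fun acc i =>
        g acc (PySem.List.pyGetD code i "") (PySem.List.pyGetD businessLine i "")
          (PySem.List.pyGetD isActive i false)) init
      = ((code.zip businessLine).zip isActive).foldl (fun acc t => g acc t.1.1 t.1.2 t.2) init := by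
  have hlen : ((code.zip businessLine).zip isActive).length = code.length := by
    simp [List.length_zip]; omega
  have aux : ∀ n : Nat, n ≤ code.length →
      (PySem.List.pyRange 0 (n : Int) 1).foldl (fun acc i =>
        g acc (PySem.List.pyGetD code i "") (PySem.List.pyGetD businessLine i "")
          (PySem.List.pyGetD isActive i false)) init
      = (((code.zip businessLine).zip isActive).take n).foldl (fun acc t => g acc t.1.1 t.1.2 t.2) init := by
    intro n hn
    induction n with
    | zero =>
      have h0 : ((0 : Nat) : Int) = 0 := by norm_num
      rw [h0, PySem.List.pyRange_one_eq_nil le_rfl]; rfl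
    | succ m ih =>
      have hm : m ≤ code.length := Nat.le_of_succ_le hn
      have hmc : m < code.length := hn
      have hmb : m < businessLine.length := lt_of_lt_of_le hmc h1
      have hma : m < isActive.length := lt_of_lt_of_le hmc h2
      have hz : m < ((code.zip businessLine).zip isActive).length := by omega
      have hcast : ((m + 1 : Nat) : Int) = (m : Int) + 1 := by push_cast; ring
      rw [hcast, PySem.List.pyRange_one_succ_right (by positivity), List.foldl_append,
        ih hm, List.take_add_one, List.getElem?_eq_getElem hz]
      have hget : ((code.zip businessLine).zip isActive)[m] = ((code[m], businessLine[m]), isActive[m]) := by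
        simp [List.getElem_zip]
      simp only [Option.toList_some, List.foldl_append, List.foldl_cons, List.foldl_nil, hget]
      rw [PySem.List.pyGetD_natCast, PySem.List.pyGetD_natCast, PySem.List.pyGetD_natCast]
      rw [List.getD_eq_getElem _ _ hmc, List.getD_eq_getElem _ _ hmb, List.getD_eq_getElem _ _ hma]
  have := aux code.length le_rfl
  rwa [List.take_of_length_le (le_of_eq hlen)] at this

set_option maxRecDepth 8192 in
theorem pv_allowed_eq : pvAllowed = pvCharacterList := by decide

theorem pv_rank_line (b : String) (hb : b ∈ pvValidB) (r : Int) (line : String)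
    (hrl : (r = 0 ∧ line = "electronics") ∨ (r = 1 ∧ line = "grocery")
      ∨ (r = 2 ∧ line = "pharmacy") ∨ (r = 3 ∧ line = "restaurant")) :
    ((((PySem.List.index? pvValidB b).getD 0 : Nat) : Int) == r) = (b == line) := by
  simp [pvValidB] at hb
  rcases hb with rfl | rfl | rfl | rfl <;>
    rcases hrl with ⟨rfl, rfl⟩ | ⟨rfl, rfl⟩ | ⟨rfl, rfl⟩ | ⟨rfl, rfl⟩ <;> decide

-- ===== VERDICT (by name: the statement is the Claim_ definition above) =====
theorem lc3606_spec : Claim_equal_lc3606 := by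
  intro code businessLine isActive _ hpre
  obtain ⟨h1, h2⟩ := hpre
  unfold Spec_lc3606
  simp only [lc3606, lc3606_alt]
  -- A's index loop over three lists is a fold over the zipped triples
  rw [pv_foldl_range_zip3 code businessLine isActive
    (fun res c b a =>
      if !a || !pvIsAlphaNum c || !pvValidB.contains b then res
      else res ++ [((((PySem.List.index? pvValidB b).getD 0 : Nat) : Int), c)]) [] h1 h2]
  -- flip A's skip-condition into a positive append-condition
  rw [show (fun (acc : List (Int × String)) (t : (String × String) × Bool) =>
        if !t.2 || !pvIsAlphaNum t.1.1 || !pvValidB.contains t.1.2 then acc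
        else acc ++ [((((PySem.List.index? pvValidB t.1.2).getD 0 : Nat) : Int), t.1.1)])
      = (fun acc t =>
        if t.2 && pvIsAlphaNum t.1.1 && pvValidB.contains t.1.2
        then acc ++ [((((PySem.List.index? pvValidB t.1.2).getD 0 : Nat) : Int), t.1.1)] else acc) from by
    funext acc t
    cases ha : t.2 <;> cases hb : pvIsAlphaNum t.1.1 <;> cases hc : pvValidB.contains t.1.2 <;>
      simp_all]
  rw [PySem.List.foldl_append_if
    (fun (t : (String × String) × Bool) => t.2 && pvIsAlphaNum t.1.1 && pvValidB.contains t.1.2)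
    (fun t => ((((PySem.List.index? pvValidB t.1.2).getD 0 : Nat) : Int), t.1.1))]
  rw [PySem.List.foldl_append_singleton_eq_map (fun p : Int × String => p.2)]
  simp only [List.nil_append]
  -- B's bucket-building loop: condition to filter, and the same filter as A's
  rw [PySem.List.foldl_if_eq_foldl_filter
    (fun (t : (String × String) × Bool) =>
      t.2 && (!t.1.1.toList.isEmpty && t.1.1.toList.all fun ch => PySem.Set.contains pvAllowed ch)
        && pvValidB.contains t.1.2)
    (fun (d : PySem.Dict String (List String)) t => d.modify t.1.2 [] (fun l => l ++ [t.1.1]))]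
  rw [show List.filter
      (fun (t : (String × String) × Bool) =>
        t.2 && (!t.1.1.toList.isEmpty && t.1.1.toList.all fun ch => PySem.Set.contains pvAllowed ch)
          && pvValidB.contains t.1.2) ((code.zip businessLine).zip isActive)
      = List.filter (fun t => t.2 && pvIsAlphaNum t.1.1 && pvValidB.contains t.1.2)
          ((code.zip businessLine).zip isActive) from
    List.filter_congr (fun t _ => by simp [pvIsAlphaNum, PySem.Set.contains, pv_allowed_eq])]
  have hmap := List.foldl_map
    (f := fun t : (String × String) × Bool => (t.1.2, t.1.1))
    (g := fun (d : PySem.Dict String (List String)) (p : String × String) =>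
      d.modify p.1 [] (fun l => l ++ [p.2]))
    (l := ((code.zip businessLine).zip isActive).filter
      (fun t => t.2 && pvIsAlphaNum t.1.1 && pvValidB.contains t.1.2))
    (init := PySem.Dict.empty)
  simp only at hmap
  rw [← hmap]
  simp only [pvValidB, List.foldl_cons, List.foldl_nil, List.nil_append,
    PySem.Dict.getD_foldl_modify_append, PySem.Dict.getD_empty, List.filter_map, List.map_map]
  -- name the list of passing triples
  set ts := ((code.zip businessLine).zip isActive).filter
    (fun t => t.2 && pvIsAlphaNum t.1.1
      && (["electronics", "grocery", "pharmacy", "restaurant"] : List String).contains t.1.2)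
    with hts
  have hmem : ∀ t ∈ ts, t.1.2 ∈ (["electronics", "grocery", "pharmacy", "restaurant"] : List String) := by
    intro t ht
    have := (List.mem_filter.1 (hts ▸ ht)).2
    have hc : (["electronics", "grocery", "pharmacy", "restaurant"] : List String).contains t.1.2 = true := by
      cases hxa : t.2 <;> cases hxb : pvIsAlphaNum t.1.1 <;>
        cases hxc : (["electronics", "grocery", "pharmacy", "restaurant"] : List String).contains t.1.2 <;>
          simp_all
    exact List.contains_iff_mem.1 hc
  have e0 : ((((PySem.List.index? (["electronics", "grocery", "pharmacy", "restaurant"] : List String) "electronics").getD 0 : Nat)) : Int) = 0 := by decide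
  have e1 : ((((PySem.List.index? (["electronics", "grocery", "pharmacy", "restaurant"] : List String) "grocery").getD 0 : Nat)) : Int) = 1 := by decide
  have e2 : ((((PySem.List.index? (["electronics", "grocery", "pharmacy", "restaurant"] : List String) "pharmacy").getD 0 : Nat)) : Int) = 2 := by decide
  have e3 : ((((PySem.List.index? (["electronics", "grocery", "pharmacy", "restaurant"] : List String) "restaurant").getD 0 : Nat)) : Int) = 3 := by decide
  -- every produced rank is 0,1,2 or 3
  have hranks : ∀ p ∈ ts.map (fun t =>
      ((((PySem.List.index? (["electronics", "grocery", "pharmacy", "restaurant"] : List String) t.1.2).getD 0 : Nat) : Int), t.1.1)),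
      p.1 = 0 ∨ p.1 = 1 ∨ p.1 = 2 ∨ p.1 = 3 := by
    intro p hp
    obtain ⟨t, ht, rfl⟩ := List.mem_map.1 hp
    have hm := hmem t ht
    simp only [List.mem_cons, List.not_mem_nil, or_false] at hm
    rcases hm with h | h | h | h <;> rw [h]
    · exact Or.inl e0
    · exact Or.inr (Or.inl e1)
    · exact Or.inr (Or.inr (Or.inl e2))
    · exact Or.inr (Or.inr (Or.inr e3))
  rw [pv_central _ hranks]
  simp only [List.map_append, pvBlk, List.filter_map, List.map_map, List.append_assoc]
  -- identify each rank filter with its businessLine filter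
  have hcongr : ∀ (r : Int) (line : String),
      ((r = 0 ∧ line = "electronics") ∨ (r = 1 ∧ line = "grocery")
        ∨ (r = 2 ∧ line = "pharmacy") ∨ (r = 3 ∧ line = "restaurant")) →
      ts.filter ((fun p : Int × String => p.1 == r) ∘
          (fun t => ((((PySem.List.index? (["electronics", "grocery", "pharmacy", "restaurant"] : List String) t.1.2).getD 0 : Nat) : Int), t.1.1)))
        = ts.filter ((fun p : String × String => p.1 == line) ∘ (fun t => (t.1.2, t.1.1))) := by
    intro r line hrl
    refine List.filter_congr ?_
    intro t ht
    simpa [pvValidB] using pv_rank_line t.1.2 (by simpa [pvValidB] using hmem t ht) r line hrl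
  rw [hcongr 0 "electronics" (by norm_num), hcongr 1 "grocery" (by norm_num),
    hcongr 2 "pharmacy" (by norm_num), hcongr 3 "restaurant" (by norm_num)]
  simp [Function.comp_def]
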